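-- pv_equiv track=rewrite | github.com/Spaceiii/expression_calculator | calcul.py | extract_calcul_from_parentheses
-- ===== SOURCE A (Python) =====
-- def parentheses_position(expression: str):
--     pos = []
--     lvl = 0
--     for idx in range(len(expression)):
--         if expression[idx] == "(":
--             lvl += 1
--             pos.append((lvl, idx))
--         elif expression[idx] == ")":
--             pos.append((lvl, idx))
--             lvl -= 1
--     return pos
--
-- def extract_calcul_from_parentheses(expression: str) -> list:
--     parentheses_pos = parentheses_position(expression)
--     parentheses_pos.sort(reverse=True, key=lambda k: k[0])
--     calculs = []
--     while len(parentheses_pos) != 0: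
--         pos1 = parentheses_pos.pop(0)[1]
--         pos2 = parentheses_pos.pop(0)[1]
--         calculs.append(expression[pos1+1:pos2])
--     return calculs
-- ===== SOURCE B (Python) =====
-- def extract_calcul_from_parentheses(expression: str) -> list:
--     # one stack pass matches each ')' to its '(' with its nesting level,
--     # then a stable sort by level (descending) orders the matched pairs
--     stack = []
--     pairs = []  # (level, open_idx, close_idx), in closing order
--     for i, c in enumerate(expression):
--         if c == "(":
--             stack.append(i)
--         elif c == ")":
--             j = stack.pop()
--             pairs.append((len(stack) + 1, j, i))
--     pairs.sort(key=lambda t: t[0], reverse=True)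
--     return [expression[j + 1:i] for (_, j, i) in pairs]
-- ===== Notes on version B (the rewrite author's own statement) =====
-- stated objective: alternative
-- what changed: B replaces A's pairing of the sorted (level,idx) entry list by repeated pop(0) with a single stack pass that matches each ')' directly to its '(' with its nesting level, followed by one stable sort of the matched pairs and a list comprehension over them.
-- outside the precondition, e.g. on extract_calcul_from_parentheses('()(('): A returns ['', ''], B returns ['']; on extract_calcul_from_parentheses(')('): A returns [''], B raises IndexError; on extract_calcul_from_parentheses('('): A raises IndexError, B returns []
import Mathlib
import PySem

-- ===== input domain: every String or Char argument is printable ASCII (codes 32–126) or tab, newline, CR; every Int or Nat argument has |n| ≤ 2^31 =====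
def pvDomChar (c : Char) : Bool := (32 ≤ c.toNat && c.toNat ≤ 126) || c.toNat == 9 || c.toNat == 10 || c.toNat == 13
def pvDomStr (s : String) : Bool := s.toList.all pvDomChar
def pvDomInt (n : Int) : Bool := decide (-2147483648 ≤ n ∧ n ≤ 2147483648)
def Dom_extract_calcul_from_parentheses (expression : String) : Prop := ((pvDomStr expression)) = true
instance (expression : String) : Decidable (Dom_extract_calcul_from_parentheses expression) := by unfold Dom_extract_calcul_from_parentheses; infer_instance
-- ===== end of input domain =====

-- B: instead of A's front-popping pairing of the sorted (level, idx) entries, one stack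
-- pass matches each ')' to its '(' directly, then one stable sort of the matched pairs
-- (objective: alternative algorithm).

-- ===== PORT A =====
-- helper parentheses_position: the loop over range(len(expression)) with state (lvl, pos)
def pvPosA : List Char → Int → Int → List (Int × Int)
  | [], _, _ => []
  | c :: rest, idx, lvl =>
    if c = '(' then (lvl + 1, idx) :: pvPosA rest (idx + 1) (lvl + 1)
    else if c = ')' then (lvl, idx) :: pvPosA rest (idx + 1) (lvl - 1)
    else pvPosA rest (idx + 1) lvl

-- the while-loop popping two positions from the front each round
def pvTakePairsA (expression : String) : List (Int × Int) → List String
  | [] => []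
  | [_] => []   -- Python's second pop(0) raises IndexError here; Pre_ excludes (odd count)
  | (_, p1) :: (_, p2) :: rest =>
      PySem.Str.slice expression (some (p1 + 1)) (some p2) :: pvTakePairsA expression rest

def extract_calcul_from_parentheses (expression : String) : List String :=
  let parentheses_pos := pvPosA expression.toList 0 0
  let parentheses_pos := PySem.List.sorted parentheses_pos (fun k => k.1) true
  pvTakePairsA expression parentheses_pos

-- ===== PORT B =====
-- the stack pass: state (i, stack of open indices, pairs accumulated in closing order)
def pvScanB : List Char → Int → List Int → List (Int × Int × Int) → List (Int × Int × Int)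
  | [], _, _, pairs => pairs
  | c :: rest, i, stack, pairs =>
    if c = '(' then pvScanB rest (i + 1) (i :: stack) pairs
    else if c = ')' then
      match stack with
      | j :: s => pvScanB rest (i + 1) s (pairs ++ [(((s.length : Int) + 1), j, i)])
      | [] => pairs   -- Python's stack.pop() raises IndexError here; Pre_ excludes
    else pvScanB rest (i + 1) stack pairs

def extract_calcul_from_parentheses_alt (expression : String) : List String :=
  let pairs := pvScanB expression.toList 0 [] []
  let pairs := PySem.List.sorted pairs (fun t => t.1) true
  pairs.map (fun t => PySem.Str.slice expression (some (t.2.1 + 1)) (some t.2.2))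

-- ===== PRECONDITION & SPEC =====
-- Pre_ excludes expressions whose parentheses are not balanced: on an odd number of
-- parenthesis characters A raises IndexError, and on other unbalanced inputs A's blind
-- pairing of the sorted entries is accidental (B only reports actually matched pairs,
-- or raises on an unmatched ')').
def Pre_extract_calcul_from_parentheses (expression : String) : Prop :=
  (∀ i : Nat, i ≤ expression.toList.length →
      (expression.toList.take i).count ')' ≤ (expression.toList.take i).count '(') ∧
  expression.toList.count '(' = expression.toList.count ')'
instance (expression : String) : Decidable (Pre_extract_calcul_from_parentheses expression) := by
  unfold Pre_extract_calcul_from_parentheses; infer_instance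

def pvWitness_extract_calcul_from_parentheses : String := "(1+(2*3))*(4-5)"

def Spec_extract_calcul_from_parentheses (expression : String) (out : List String) : Prop := out = extract_calcul_from_parentheses_alt expression
instance (expression : String) (out : List String) : Decidable (Spec_extract_calcul_from_parentheses expression out) := by unfold Spec_extract_calcul_from_parentheses; infer_instance

-- ===== CLAIM (what is proved, stated in full; the proofs are below) =====
def Claim_equal_extract_calcul_from_parentheses : Prop := ∀ (expression : String), Dom_extract_calcul_from_parentheses expression → Pre_extract_calcul_from_parentheses expression → Spec_extract_calcul_from_parentheses expression (extract_calcul_from_parentheses expression)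

-- ===== LEMMAS AND PROOFS =====

-- B's scan without the accumulator
def pvScanB' : List Char → Int → List Int → List (Int × Int × Int)
  | [], _, _ => []
  | c :: rest, i, stack =>
    if c = '(' then pvScanB' rest (i + 1) (i :: stack)
    else if c = ')' then
      match stack with
      | j :: s => (((s.length : Int) + 1), j, i) :: pvScanB' rest (i + 1) s
      | [] => []
    else pvScanB' rest (i + 1) stack

theorem pvScanB_eq_append (cs : List Char) : ∀ (i : Int) (stack : List Int) (pairs : List (Int × Int × Int)),
    pvScanB cs i stack pairs = pairs ++ pvScanB' cs i stack := by
  induction cs with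
  | nil => intro i stack pairs; simp [pvScanB, pvScanB']
  | cons c rest ih =>
    intro i stack pairs
    by_cases h1 : c = '('
    · simp [pvScanB, pvScanB', h1, ih]
    · by_cases h2 : c = ')'
      · cases stack with
        | nil => simp [pvScanB, pvScanB', h1, h2]
        | cons j s => simp [pvScanB, pvScanB', h1, h2, ih]
      · simp [pvScanB, pvScanB', h1, h2, ih]

-- pending open parentheses of the stack, as A's (level, index) entries, bottom-to-top
def pvPend : List Int → List (Int × Int)
  | [] => []
  | j :: s => pvPend s ++ [(((s.length : Int) + 1), j)]

theorem pvPend_lvl_le (s : List Int) : ∀ e ∈ pvPend s, e.1 ≤ (s.length : Int) := by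
  induction s with
  | nil => simp [pvPend]
  | cons j t ih =>
    intro e he
    simp only [pvPend, List.mem_append, List.mem_singleton] at he
    rcases he with he | he
    · have := ih e he; simp only [List.length_cons]; push_cast; omega
    · subst he; simp

-- the remaining input can be processed with k pending opens and ends with none pending
def pvOK (cs : List Char) (k : Nat) : Prop :=
  (∀ p : Nat, (cs.take p).count ')' ≤ (cs.take p).count '(' + k) ∧
  cs.count '(' + k = cs.count ')'

def pvPairFun : Int × Int × Int → List (Int × Int) := fun t => [(t.1, t.2.1), (t.1, t.2.2)]

-- MAIN SCAN INVARIANT: per level, A's entries (pending opens ++ scan of the rest) are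
-- exactly B's matched pairs flattened to (level, open) (level, close)
theorem pvInv (cs : List Char) : ∀ (i : Int) (stack : List Int), pvOK cs stack.length →
    ∀ l : Int,
      (pvPend stack ++ pvPosA cs i (stack.length : Int)).filter (fun e => e.1 == l)
        = ((pvScanB' cs i stack).filter (fun t => t.1 == l)).flatMap pvPairFun := by
  induction cs with
  | nil =>
    intro i stack hok l
    have hnil : stack = [] := by
      have h2 := hok.2; simpa using h2
    subst hnil
    simp [pvPend, pvPosA, pvScanB']
  | cons c rest ih =>
    intro i stack hok l
    by_cases h1 : c = '('
    · -- push
      have hok' : pvOK rest (i :: stack).length := by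
        constructor
        · intro p
          have := hok.1 (p + 1)
          simp [h1, List.take_succ_cons, List.count_cons] at this ⊢
          omega
        · have := hok.2
          simp [h1, List.count_cons] at this ⊢
          omega
      have hcast : ((stack.length : Int) + 1) = ((i :: stack).length : Int) := by
        simp
      have hIH := ih (i + 1) (i :: stack) hok' l
      simp only [pvPosA, pvScanB', h1, if_pos rfl]
      rw [hcast]
      calc (pvPend stack ++ (((i :: stack).length : Int), i) :: pvPosA rest (i + 1) ((i :: stack).length : Int)).filter (fun e => e.1 == l)
          = (pvPend (i :: stack) ++ pvPosA rest (i + 1) ((i :: stack).length : Int)).filter (fun e => e.1 == l) := by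
            simp [pvPend, List.append_assoc]
        _ = _ := by
            have : ((i :: stack).length : Int) = (((i :: stack).length : Nat) : Int) := rfl
            exact hIH
    · by_cases h2 : c = ')'
      · -- pop
        have hk : 1 ≤ stack.length := by
          have := hok.1 1
          simp [h2, List.take_succ_cons, List.count_cons] at this
          omega
        cases stack with
        | nil => simp at hk
        | cons j s =>
          have hok' : pvOK rest s.length := by
            constructor
            · intro p
              have := hok.1 (p + 1)
              simp [h2, List.take_succ_cons, List.count_cons] at this ⊢
              omega
            · have := hok.2
              simp [h2, List.count_cons] at this ⊢
              omega
          have hK : ((j :: s).length : Int) = (s.length : Int) + 1 := by push_cast; simp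
          have hKm : ((j :: s).length : Int) - 1 = (s.length : Int) := by rw [hK]; ring
          have hIH := ih (i + 1) s hok' l
          simp only [pvPosA, pvScanB', h1, h2, if_neg h1, if_pos rfl]
          rw [hKm, hK]
          have hpend : pvPend (j :: s) = pvPend s ++ [(((s.length : Int) + 1), j)] := rfl
          rw [hpend]
          by_cases hl : ((s.length : Int) + 1) = l
          · -- l is exactly the closing level: pend s has only strictly smaller levels
            have hpnil : (pvPend s).filter (fun e => e.1 == l) = [] := by
              rw [List.filter_eq_nil_iff]
              intro e he
              have := pvPend_lvl_le s e he
              simp only [beq_iff_eq]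
              omega
            have hIH' : (pvPosA rest (i + 1) (s.length : Int)).filter (fun e => e.1 == l)
                = ((pvScanB' rest (i + 1) s).filter (fun t => t.1 == l)).flatMap pvPairFun := by
              simpa [List.filter_append, hpnil] using hIH
            simp [List.filter_append, List.filter_cons, hpnil, hl, pvPairFun, hIH']
          · have hbeq : ((((s.length : Int) + 1)) == l) = false := by simp [hl]
            simp only [List.filter_append] at hIH
            simp [List.filter_append, List.filter_cons, hbeq]
            exact hIH
      · -- other character
        have hok' : pvOK rest stack.length := by
          constructor
          · intro p
            have := hok.1 (p + 1)
            simp [List.take_succ_cons, List.count_cons, h1, h2] at this ⊢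
            omega
          · have := hok.2
            simp [List.count_cons, h1, h2] at this ⊢
            omega
        have := ih (i + 1) stack hok' l
        simp only [pvPosA, pvScanB', if_neg h1, if_neg h2]
        exact this

-- ---------- stable descending sort as blocks of equal keys ----------

-- insert a level into a strictly descending list of levels
def pvIns (k : Int) : List Int → List Int
  | [] => [k]
  | m :: ms => if m < k then k :: m :: ms else if k = m then m :: ms else m :: pvIns k ms

theorem pvMem_pvIns (k x : Int) : ∀ L : List Int, x ∈ pvIns k L ↔ x = k ∨ x ∈ L := by
  intro L
  induction L with
  | nil => simp [pvIns]
  | cons m ms ih =>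
    by_cases h1 : m < k
    · simp [pvIns, h1]
    · by_cases h2 : k = m
      · subst h2; simp [pvIns, h1]
      · simp [pvIns, h1, h2, ih]; tauto

theorem pvIns_pairwise (k : Int) : ∀ L : List Int, L.Pairwise (· > ·) → (pvIns k L).Pairwise (· > ·) := by
  intro L
  induction L with
  | nil => intro _; simp [pvIns]
  | cons m ms ih =>
    intro hp
    rcases List.pairwise_cons.mp hp with ⟨hm, hms⟩
    by_cases h1 : m < k
    · have : (pvIns k (m :: ms)) = k :: m :: ms := by simp [pvIns, h1]
      rw [this]
      refine List.pairwise_cons.mpr ⟨?_, hp⟩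
      intro b hb
      rcases List.mem_cons.mp hb with rfl | hb
      · omega
      · have := hm b hb; omega
    · by_cases h2 : k = m
      · subst h2
        have : (pvIns k (k :: ms)) = k :: ms := by simp [pvIns, h1]
        rw [this]; exact hp
      · have : (pvIns k (m :: ms)) = m :: pvIns k ms := by simp [pvIns, h1, h2]
        rw [this]
        refine List.pairwise_cons.mpr ⟨?_, ih hms⟩
        intro b hb
        rcases (pvMem_pvIns k b ms).mp hb with rfl | hb
        · omega
        · exact hm b hb

def pvLvls {α : Type} (key : α → Int) (xs : List α) : List Int :=
  xs.foldl (fun acc x => pvIns (key x) acc) []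

theorem pvLvls_append {α : Type} (key : α → Int) (ys : List α) (x : α) :
    pvLvls key (ys ++ [x]) = pvIns (key x) (pvLvls key ys) := by
  simp [pvLvls, List.foldl_append]

theorem pvLvls_aux_pairwise {α : Type} (key : α → Int) (xs : List α) : ∀ acc : List Int,
    acc.Pairwise (· > ·) → (xs.foldl (fun acc x => pvIns (key x) acc) acc).Pairwise (· > ·) := by
  induction xs with
  | nil => intro acc h; simpa
  | cons x t ih => intro acc h; exact ih _ (pvIns_pairwise _ _ h)

theorem pvLvls_pairwise {α : Type} (key : α → Int) (xs : List α) : (pvLvls key xs).Pairwise (· > ·) :=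
  pvLvls_aux_pairwise key xs [] (by simp)

theorem pvMem_lvls_aux {α : Type} (key : α → Int) (xs : List α) : ∀ (acc : List Int) (m : Int),
    m ∈ xs.foldl (fun acc x => pvIns (key x) acc) acc ↔ m ∈ acc ∨ ∃ y ∈ xs, key y = m := by
  induction xs with
  | nil => intro acc m; simp
  | cons x t ih =>
    intro acc m
    simp only [List.foldl_cons, ih, pvMem_pvIns]
    constructor
    · rintro (⟨h | h⟩ | h)
      · exact Or.inr ⟨x, by simp, h.symm⟩
      · exact Or.inl h
      · rcases h with ⟨y, hy, hk⟩; exact Or.inr ⟨y, by simp [hy], hk⟩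
    · rintro (h | ⟨y, hy, hk⟩)
      · exact Or.inl (Or.inr h)
      · rcases List.mem_cons.mp hy with rfl | hy
        · exact Or.inl (Or.inl hk.symm)
        · exact Or.inr ⟨y, hy, hk⟩

theorem pvMem_lvls {α : Type} (key : α → Int) (xs : List α) (m : Int) :
    m ∈ pvLvls key xs ↔ ∃ y ∈ xs, key y = m := by
  simp [pvLvls, pvMem_lvls_aux]

theorem pvInsertBy_skip {α : Type} (bef : α → α → Bool) (x : α) :
    ∀ (A B : List α), (∀ y ∈ A, bef x y = false) →
      PySem.List.insertBy bef x (A ++ B) = A ++ PySem.List.insertBy bef x B := by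
  intro A
  induction A with
  | nil => intro B _; simp
  | cons a t ih =>
    intro B h
    have ha : bef x a = false := h a (by simp)
    simp only [List.cons_append, PySem.List.insertBy, ha]
    simp only [Bool.false_eq_true, if_false]
    rw [ih B (fun y hy => h y (by simp [hy]))]

theorem pvInsertBy_front {α : Type} (bef : α → α → Bool) (x : α) :
    ∀ B : List α, (∀ y ∈ B, bef x y = true) → PySem.List.insertBy bef x B = x :: B := by
  intro B h
  cases B with
  | nil => simp [PySem.List.insertBy]
  | cons b t => simp [PySem.List.insertBy, h b (by simp)]

theorem pvFilter_ne_key {α : Type} (key : α → Int) (ys : List α) (l m : Int) (h : l ≠ m) :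
    (ys.filter (fun y => !(key y == m))).filter (fun y => key y == l)
      = ys.filter (fun y => key y == l) := by
  induction ys with
  | nil => simp
  | cons y t ih =>
    by_cases hy : key y = l
    · have hym : key y ≠ m := by omega
      simp [List.filter_cons, hy, hym, h, ih]
    · by_cases hm : key y = m
      · simp [List.filter_cons, hy, hm, ih, Ne.symm h]
      · simp [List.filter_cons, hy, hm, ih]

-- inserting x into the block decomposition appends it to the end of its own level block
theorem pvINS {α : Type} (key : α → Int) (x : α) :
    ∀ (L : List Int) (ys : List α), L.Pairwise (· > ·) → (∀ y ∈ ys, key y ∈ L) →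
      PySem.List.insertBy (fun a b => decide (key b < key a)) x
          (L.flatMap (fun l => ys.filter (fun y => key y == l)))
        = (pvIns (key x) L).flatMap
            (fun l => ys.filter (fun y => key y == l) ++ (if key x == l then [x] else [])) := by
  intro L
  induction L with
  | nil =>
    intro ys _ hcov
    have hys : ys = [] := by
      cases ys with
      | nil => rfl
      | cons y t => exact absurd (hcov y (by simp)) (by simp)
    subst hys
    simp [pvIns, PySem.List.insertBy]
  | cons m ms ih =>
    intro ys hp hcov
    rcases List.pairwise_cons.mp hp with ⟨hm, hms⟩
    rcases lt_trichotomy m (key x) with h1 | h1 | h1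
    · -- new maximal level: x goes to the very front
      have hfront : ∀ y ∈ (m :: ms).flatMap (fun l => ys.filter (fun y => key y == l)),
          (fun a b => decide (key b < key a)) x y = true := by
        intro y hy
        rcases List.mem_flatMap.mp hy with ⟨l, hl, hyl⟩
        have hkey := List.of_mem_filter hyl
        simp only [beq_iff_eq] at hkey
        rcases List.mem_cons.mp hl with rfl | hl
        · simp; omega
        · have := hm l hl; simp; omega
      rw [pvInsertBy_front _ _ _ hfront]
      have hins : pvIns (key x) (m :: ms) = key x :: m :: ms := by simp [pvIns, h1]
      rw [hins]
      have hxnil : ys.filter (fun y => key y == key x) = [] := by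
        rw [List.filter_eq_nil_iff]
        intro y hy
        have := hcov y hy
        rcases List.mem_cons.mp this with h | h
        · simp; omega
        · have := hm _ h; simp; omega
      have hnem : ∀ l ∈ m :: ms, ((key x == l) = false) := by
        intro l hl
        rcases List.mem_cons.mp hl with rfl | hl
        · simp; omega
        · have := hm _ hl; simp; omega
      have hms_congr :
          ms.flatMap (fun l => ys.filter (fun y => key y == l) ++ if (key x == l) = true then [x] else [])
            = ms.flatMap (fun l => ys.filter (fun y => key y == l)) :=
        List.flatMap_congr (fun l hl => by rw [hnem l (List.mem_cons_of_mem _ hl)]; simp)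
      simp only [List.flatMap_cons, hms_congr, hxnil, List.nil_append, hnem m (by simp),
        beq_self_eq_true]
      simp
    · -- x's level already the head level: append x at the end of the head block
      have hskip : ∀ y ∈ ys.filter (fun y => key y == m),
          (fun a b => decide (key b < key a)) x y = false := by
        intro y hy
        have := List.of_mem_filter hy
        simp only [beq_iff_eq] at this
        simp; omega
      rw [List.flatMap_cons, pvInsertBy_skip _ _ _ _ hskip]
      have hfront : ∀ y ∈ ms.flatMap (fun l => ys.filter (fun y => key y == l)),
          (fun a b => decide (key b < key a)) x y = true := by
        intro y hy
        rcases List.mem_flatMap.mp hy with ⟨l, hl, hyl⟩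
        have hkey := List.of_mem_filter hyl
        simp only [beq_iff_eq] at hkey
        have := hm l hl; simp; omega
      rw [pvInsertBy_front _ _ _ hfront]
      have hins : pvIns (key x) (m :: ms) = m :: ms := by
        have hnlt : ¬ (m < key x) := by omega
        simp [pvIns, hnlt, h1]
      rw [hins]
      have hnem : ∀ l ∈ ms, ((key x == l) = false) := by
        intro l hl
        have := hm _ hl; simp; omega
      have hxm : (key x == m) = true := by simp [h1]
      have hms_congr :
          ms.flatMap (fun l => ys.filter (fun y => key y == l) ++ if (key x == l) = true then [x] else [])
            = ms.flatMap (fun l => ys.filter (fun y => key y == l)) :=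
        List.flatMap_congr (fun l hl => by rw [hnem l hl]; simp)
      simp only [List.flatMap_cons, hms_congr, hxm]
      simp
    · -- x's level below the head: skip the head block and recurse on ys without level m
      have hskip : ∀ y ∈ ys.filter (fun y => key y == m),
          (fun a b => decide (key b < key a)) x y = false := by
        intro y hy
        have := List.of_mem_filter hy
        simp only [beq_iff_eq] at this
        simp; omega
      rw [List.flatMap_cons, pvInsertBy_skip _ _ _ _ hskip]
      have hcov' : ∀ y ∈ ys.filter (fun y => !(key y == m)), key y ∈ ms := by
        intro y hy
        have h1y := List.of_mem_filter hy
        have h2y := hcov y (List.mem_of_mem_filter hy)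
        simp only [Bool.not_eq_eq_eq_not, Bool.not_true, beq_eq_false_iff_ne, ne_eq] at h1y
        rcases List.mem_cons.mp h2y with h | h
        · exact absurd h h1y
        · exact h
      have htail : ∀ l ∈ ms, ys.filter (fun y => key y == l)
          = (ys.filter (fun y => !(key y == m))).filter (fun y => key y == l) := by
        intro l hl
        have : l ≠ m := by have := hm l hl; omega
        rw [pvFilter_ne_key key ys l m this]
      have htail_congr :
          ms.flatMap (fun l => ys.filter (fun y => key y == l))
            = ms.flatMap (fun l => (ys.filter (fun y => !(key y == m))).filter (fun y => key y == l)) :=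
        List.flatMap_congr (fun l hl => htail l hl)
      rw [htail_congr, ih (ys.filter (fun y => !(key y == m))) hms hcov']
      have hins : pvIns (key x) (m :: ms) = m :: pvIns (key x) ms := by
        have hnlt : ¬ (m < key x) := by omega
        have hne : key x ≠ m := by omega
        simp [pvIns, hnlt, hne]
      have hxm : (key x == m) = false := by simp; omega
      have hback :
          (pvIns (key x) ms).flatMap
              (fun l => (ys.filter (fun y => !(key y == m))).filter (fun y => key y == l)
                ++ if (key x == l) = true then [x] else [])
            = (pvIns (key x) ms).flatMap
              (fun l => ys.filter (fun y => key y == l) ++ if (key x == l) = true then [x] else []) := by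
        refine List.flatMap_congr (fun l hl => ?_)
        have hlm : l ≠ m := by
          rcases (pvMem_pvIns _ _ _).mp hl with rfl | hl
          · omega
          · have := hm l hl; omega
        rw [pvFilter_ne_key key ys l m hlm]
      rw [hins, List.flatMap_cons, hback, hxm]
      simp

-- the stable descending sort is the concatenation of equal-key blocks, highest key first
theorem pvBlocks {α : Type} (key : α → Int) (xs : List α) :
    PySem.List.sorted xs key true
      = (pvLvls key xs).flatMap (fun l => xs.filter (fun y => key y == l)) := by
  induction xs using List.reverseRecOn with
  | nil => simp [pvLvls, PySem.List.sorted_rev_eq_foldl_insertBy]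
  | append_singleton ys x ih =>
    have hfold : PySem.List.sorted (ys ++ [x]) key true
        = PySem.List.insertBy (fun a b => decide (key b < key a)) x (PySem.List.sorted ys key true) := by
      rw [PySem.List.sorted_rev_eq_foldl_insertBy, PySem.List.sorted_rev_eq_foldl_insertBy,
        List.foldl_append]
      simp
    rw [hfold, ih, pvINS key x (pvLvls key ys) ys (pvLvls_pairwise key ys)
      (fun y hy => (pvMem_lvls key ys (key y)).mpr ⟨y, hy, rfl⟩), pvLvls_append]
    refine List.flatMap_congr (fun l hl => ?_)
    rw [List.filter_append, List.filter_cons]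
    by_cases h : key x = l <;> simp [h]

-- two strictly descending lists with the same members are equal
theorem pvDescEq (L M : List Int) (hL : L.Pairwise (· > ·)) (hM : M.Pairwise (· > ·))
    (h : ∀ l : Int, l ∈ L ↔ l ∈ M) : L = M := by
  have hnL : L.Nodup := hL.imp (fun h => ne_of_gt h)
  have hnM : M.Nodup := hM.imp (fun h => ne_of_gt h)
  have hperm : L.Perm M := (List.perm_ext_iff_of_nodup hnL hnM).mpr h
  exact List.eq_of_perm_of_sorted (fun a b _ _ hab hba => by omega) hL hM hperm

theorem pvFlatMap_pairFun_nil (G : List (Int × Int × Int)) :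
    G.flatMap pvPairFun = [] ↔ G = [] := by
  cases G with
  | nil => simp
  | cons t r => simp [pvPairFun]

theorem pvTakePairs_flat (expression : String) : ∀ ps : List (Int × Int × Int),
    pvTakePairsA expression (ps.flatMap pvPairFun)
      = ps.map (fun t => PySem.Str.slice expression (some (t.2.1 + 1)) (some t.2.2)) := by
  intro ps
  induction ps with
  | nil => simp [pvTakePairsA]
  | cons t r ih => simp [pvPairFun, pvTakePairsA, ih]

-- ===== VERDICT (by name: the statement is the Claim_ definition above) =====
theorem extract_calcul_from_parentheses_spec : Claim_equal_extract_calcul_from_parentheses := by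
  intro expression _ hpre
  unfold Spec_extract_calcul_from_parentheses
  set cs := expression.toList with hcs
  have hok : pvOK cs ([] : List Int).length := by
    constructor
    · intro p
      by_cases hp : p ≤ cs.length
      · simpa using hpre.1 p hp
      · have h2 := hpre.2
        rw [← hcs] at h2
        rw [List.take_of_length_le (by omega)]
        simp only [List.length_nil]
        omega
    · simpa using hpre.2
  have hinv := pvInv cs 0 [] hok
  simp only [pvPend, List.nil_append, List.length_nil, Nat.cast_zero] at hinv
  set pos := pvPosA cs 0 0 with hpos
  set pairs := pvScanB' cs 0 [] with hpairs
  have hscan : pvScanB cs 0 [] [] = pairs := by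
    rw [pvScanB_eq_append, List.nil_append]
  have hlvls : pvLvls (fun e : Int × Int => e.1) pos = pvLvls (fun t : Int × Int × Int => t.1) pairs := by
    refine pvDescEq _ _ (pvLvls_pairwise _ _) (pvLvls_pairwise _ _) (fun l => ?_)
    rw [pvMem_lvls, pvMem_lvls]
    have h1 : (∃ y ∈ pos, y.1 = l) ↔ pos.filter (fun e => e.1 == l) ≠ [] := by
      rw [Ne, List.filter_eq_nil_iff]; push_neg; simp
    have h2 : (∃ y ∈ pairs, y.1 = l) ↔ pairs.filter (fun t => t.1 == l) ≠ [] := by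
      rw [Ne, List.filter_eq_nil_iff]; push_neg; simp
    rw [h1, h2, hinv l, Ne, Ne, pvFlatMap_pairFun_nil]
  have hsorted : PySem.List.sorted pos (fun k => k.1) true
      = (PySem.List.sorted pairs (fun t => t.1) true).flatMap pvPairFun := by
    rw [pvBlocks (fun e : Int × Int => e.1) pos, pvBlocks (fun t : Int × Int × Int => t.1) pairs,
      hlvls, List.flatMap_assoc]
    exact List.flatMap_congr (fun l _ => hinv l)
  have hA : extract_calcul_from_parentheses expression
      = pvTakePairsA expression (PySem.List.sorted pos (fun k => k.1) true) := rfl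
  have hB : extract_calcul_from_parentheses_alt expression
      = (PySem.List.sorted (pvScanB cs 0 [] []) (fun t => t.1) true).map
          (fun t => PySem.Str.slice expression (some (t.2.1 + 1)) (some t.2.2)) := rfl
  rw [hA, hB, hscan, hsorted, pvTakePairs_flat]
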